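-- pv_equiv track=rewrite | github.com/MD-Studio/MDStudio | components/lie_md/lie_md/scripts/getEnergies.py | get_residue_from_columns
-- ===== SOURCE A (Python) =====
-- import collections
--
-- def get_residue_from_columns(name, columns):
--     """
--     Extract the ligand terms from the column names.
--
--     :param name: Name of the residue
--     :param columns: name of the columns in the dataframe
--     :return: dictionary containing the residue's names as
--            keys and electrostatic and vdw names as values.
--     """
--     names = collections.defaultdict(list)
--     for c in filter(lambda x: name in x, columns):
--         v, k = c.split(':')
--         names[k].append(v)
--
--     # Sort the list
--     for xs in names.values():
--         xs.sort()
--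
--     return names
-- ===== SOURCE B (Python) =====
-- import collections
--
-- def get_residue_from_columns(name, columns):
--     # Precompute the matched (v, k) pairs once, then build each key's
--     # group with a per-key pass, already sorted, at first occurrence of the key.
--     pairs = [c.split(':') for c in columns if name in c]
--     names = collections.defaultdict(list)
--     for _, k in pairs:
--         if k not in names:
--             names[k] = sorted(v for v, kk in pairs if kk == k)
--     return names
-- ===== Notes on version B (the rewrite author's own statement) =====
-- stated objective: alternative
-- what changed: B precomputes the matched (v,k) pairs once, then forms each key's group with a per-key scan of the pairs, sorted at the key's first occurrence, instead of A's append-into-defaultdict loop followed by an in-place sort of every value list.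
import Mathlib
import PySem

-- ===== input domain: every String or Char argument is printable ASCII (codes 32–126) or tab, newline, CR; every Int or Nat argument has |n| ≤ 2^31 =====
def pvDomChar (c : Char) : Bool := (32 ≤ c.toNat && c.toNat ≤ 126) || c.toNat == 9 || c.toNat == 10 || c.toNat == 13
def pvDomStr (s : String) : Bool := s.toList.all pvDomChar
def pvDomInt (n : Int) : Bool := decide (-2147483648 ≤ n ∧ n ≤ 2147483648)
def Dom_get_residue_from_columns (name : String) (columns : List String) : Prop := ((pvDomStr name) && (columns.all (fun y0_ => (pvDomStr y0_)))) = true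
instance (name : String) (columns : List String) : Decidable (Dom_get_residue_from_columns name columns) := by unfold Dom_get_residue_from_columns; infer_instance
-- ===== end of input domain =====

-- B builds each suffix-key group by a per-key scan of the precomputed (v,k) pairs, sorted at the key's
-- first occurrence, instead of A's append-then-sort defaultdict loop (objective: alternative decomposition).


-- ===== PORT A =====
def get_residue_from_columns (name : String) (columns : List String) : List (String × List String) :=
  let names : PySem.Dict String (List String) :=
    (columns.filter (fun c => PySem.Str.isIn name c)).foldl
      (fun d c =>
        match PySem.Str.split? c ":" with
        | some [v, k] => d.insert k (d.getD k [] ++ [v])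
        | _ => d)  -- unpacking 'v, k = c.split(':')' raises ValueError here: outside Pre_
      PySem.Dict.empty
  (names.items.map (fun p => (p.1, PySem.List.sorted p.2 (fun x => x) false)))

-- ===== PORT B =====
-- c.split(':') unpacked to a pair; the fallback arm is a ValueError in Python (outside Pre_)
def pvSplitPairB (c : String) : String × String :=
  let ps := (PySem.Str.split? c ":").getD []
  (ps.headD c, ps.getLastD c)

def get_residue_from_columns_alt (name : String) (columns : List String) : List (String × List String) :=
  let pairs := (columns.filter (fun c => PySem.Str.isIn name c)).map pvSplitPairB
  let names : PySem.Dict String (List String) :=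
    pairs.foldl
      (fun d p =>
        if d.contains p.2 then d
        else d.insert p.2 (PySem.List.sorted ((pairs.filter (fun q => q.2 == p.2)).map Prod.fst) (fun x => x) false))
      PySem.Dict.empty
  names.items

-- ===== PRECONDITION & SPEC =====
-- Pre_ excludes exactly the inputs where some matched column does not split on ':' into two parts,
-- on which A's tuple unpacking raises ValueError (B raises there too).
def Pre_get_residue_from_columns (name : String) (columns : List String) : Prop :=
  ∀ c ∈ columns, PySem.Str.isIn name c = true → ((PySem.Str.split? c ":").getD []).length = 2
instance (name : String) (columns : List String) : Decidable (Pre_get_residue_from_columns name columns) := by unfold Pre_get_residue_from_columns; infer_instance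

def pvWitness_get_residue_from_columns : String × List String := ("lig", ["ele:lig-1", "vdw:lig-1", "ele:sol"])

def Spec_get_residue_from_columns (name : String) (columns : List String) (out : List (String × List String)) : Prop := out = get_residue_from_columns_alt name columns
instance (name : String) (columns : List String) (out : List (String × List String)) : Decidable (Spec_get_residue_from_columns name columns out) := by unfold Spec_get_residue_from_columns; infer_instance

-- ===== CLAIM (what is proved, stated in full; the proofs are below) =====
def Claim_equal_get_residue_from_columns : Prop := ∀ (name : String) (columns : List String), Dom_get_residue_from_columns name columns → Pre_get_residue_from_columns name columns → Spec_get_residue_from_columns name columns (get_residue_from_columns name columns)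

-- ===== LEMMAS AND PROOFS =====


theorem ofList_append_singleton {α : Type} [DecidableEq α] (xs : List α) (x : α) :
    PySem.Set.ofList (xs ++ [x]) = if x ∈ PySem.Set.ofList xs then PySem.Set.ofList xs else PySem.Set.ofList xs ++ [x] := by
  simp [PySem.Set.ofList_eq_foldl, List.foldl_append, PySem.Set.add]

theorem pvBuildB_items (V : String → List String) (l : List (String × String)) :
    (l.foldl (fun d p => if d.contains p.2 then d else d.insert p.2 (V p.2)) (PySem.Dict.empty : PySem.Dict String (List String))).items
      = (PySem.Set.ofList (l.map Prod.snd)).map (fun k => (k, V k)) := by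
  induction l using List.reverseRecOn with
  | nil => rfl
  | append_singleton l p ih =>
    rw [List.foldl_append]
    have hkeys : (l.foldl (fun d p => if d.contains p.2 then d else d.insert p.2 (V p.2)) (PySem.Dict.empty : PySem.Dict String (List String))).keys
        = PySem.Set.ofList (l.map Prod.snd) := by
      simp only [PySem.Dict.keys, ih, List.map_map, Function.comp_def, List.map_id']
    have hcont : (l.foldl (fun d p => if d.contains p.2 then d else d.insert p.2 (V p.2)) (PySem.Dict.empty : PySem.Dict String (List String))).contains p.2
        = decide (p.2 ∈ PySem.Set.ofList (l.map Prod.snd)) := by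
      rw [PySem.Dict.contains_eq_decide_mem_keys, hkeys]
    simp only [List.map_append, List.map_cons, List.map_nil, ofList_append_singleton]
    by_cases hm : p.2 ∈ PySem.Set.ofList (l.map Prod.snd)
    · simp [hcont, hm, ih]
    · simp only [List.foldl_cons, List.foldl_nil, hcont, hm, decide_false, Bool.false_eq_true, if_neg, not_false_eq_true]
      rw [PySem.Dict.items_insert_of_not_contains _ _ (by rw [hcont]; simp [hm])]
      simp [ih]

def pvCollect (l : List (String × String)) (k : String) : List String :=
  (l.filter (fun q => q.2 == k)).map Prod.fst

theorem pvCollect_append_singleton (l : List (String × String)) (p : String × String) (k : String) :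
    pvCollect (l ++ [p]) k = pvCollect l k ++ (if p.2 == k then [p.1] else []) := by
  by_cases h : (p.2 == k) = true <;> simp [pvCollect, List.filter_append, h]

theorem pvBuildA_items (l : List (String × String)) :
    (l.foldl (fun d p => d.insert p.2 (d.getD p.2 [] ++ [p.1])) (PySem.Dict.empty : PySem.Dict String (List String))).items
      = (PySem.Set.ofList (l.map Prod.snd)).map (fun k => (k, pvCollect l k)) := by
  induction l using List.reverseRecOn with
  | nil => rfl
  | append_singleton l p ih =>
    rw [List.foldl_append]
    set F : PySem.Dict String (List String) → String × String → PySem.Dict String (List String) :=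
      fun d p => d.insert p.2 (d.getD p.2 [] ++ [p.1]) with hF
    set d := l.foldl F (PySem.Dict.empty : PySem.Dict String (List String)) with hd
    have hkeys : d.keys = PySem.Set.ofList (l.map Prod.snd) := by
      simp only [PySem.Dict.keys, ih, List.map_map, Function.comp_def, List.map_id']
    have hcont : d.contains p.2 = decide (p.2 ∈ PySem.Set.ofList (l.map Prod.snd)) := by
      rw [PySem.Dict.contains_eq_decide_mem_keys, hkeys]
    simp only [List.map_append, List.map_cons, List.map_nil, ofList_append_singleton]
    by_cases hm : p.2 ∈ PySem.Set.ofList (l.map Prod.snd)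
    · -- existing key: overwrite in place with appended value
      have hget : d.getD p.2 [] = pvCollect l p.2 := by
        have hmem : (p.2, pvCollect l p.2) ∈ d.items := by
          rw [ih]; exact List.mem_map_of_mem hm
        have := PySem.Dict.get?_of_mem_items d hmem (by rw [hkeys]; exact PySem.Set.nodup_ofList _)
        rw [PySem.Dict.getD_eq_get?_getD, this]; rfl
      rw [if_pos hm, hF]
      simp only [List.foldl_cons, List.foldl_nil]
      rw [PySem.Dict.items_insert_of_contains _ _ (by rw [hcont]; simp [hm]), hget, ih, List.map_map]
      apply List.map_congr_left
      intro k hk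
      simp only [Function.comp_def, pvCollect_append_singleton]
      by_cases hkp : k = p.2
      · subst hkp
        simp [pvCollect]
      · have h1 : (k == p.2) = false := by simp [hkp]
        have h2 : (p.2 == k) = false := by simp [Ne.symm hkp]
        simp [pvCollect, h1, h2]
    · have hget : d.getD p.2 [] = [] :=
        PySem.Dict.getD_of_not_contains _ _ (by rw [hcont]; simp [hm])
      have hcoll : pvCollect l p.2 = [] := by
        have : ∀ q ∈ l, ¬ (q.2 == p.2) = true := by
          intro q hq hbe
          exact hm (by rw [PySem.Set.mem_ofList]; exact (beq_iff_eq.mp hbe) ▸ List.mem_map_of_mem hq)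
        simp [pvCollect, List.filter_eq_nil_iff.mpr this]
      rw [if_neg hm, hF]
      simp only [List.foldl_cons, List.foldl_nil]
      rw [PySem.Dict.items_insert_of_not_contains _ _ (by rw [hcont]; simp [hm]), hget, ih]
      rw [List.map_append]
      congr 1
      · apply List.map_congr_left
        intro k hk
        have hkp : ¬ (p.2 == k) = true := by
          simp only [beq_iff_eq]
          intro h; exact hm (h ▸ hk)
        simp [pvCollect_append_singleton, hkp]
      · simp [pvCollect_append_singleton, hcoll]

theorem pvFoldA_eq (name : String) (columns : List String)
    (hpre : Pre_get_residue_from_columns name columns) :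
    (columns.filter (fun c => PySem.Str.isIn name c)).foldl
      (fun d c =>
        match PySem.Str.split? c ":" with
        | some [v, k] => d.insert k (d.getD k [] ++ [v])
        | _ => d)
      (PySem.Dict.empty : PySem.Dict String (List String))
    = ((columns.filter (fun c => PySem.Str.isIn name c)).map pvSplitPairB).foldl
        (fun d p => d.insert p.2 (d.getD p.2 [] ++ [p.1])) PySem.Dict.empty := by
  rw [List.foldl_map]
  apply PySem.List.foldl_congr_mem
  intro d c hc
  obtain ⟨hmem, hin⟩ := List.mem_filter.mp hc
  have hlen := hpre c hmem hin
  cases h : PySem.Str.split? c ":" with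
  | none => rw [h] at hlen; simp at hlen
  | some ls =>
    rw [h] at hlen
    simp only [Option.getD_some] at hlen
    match ls, hlen with
    | [a, b], _ => simp [h, pvSplitPairB]

-- ===== VERDICT (by name: the statement is the Claim_ definition above) =====
theorem get_residue_from_columns_spec : Claim_equal_get_residue_from_columns := by
  intro name columns _hdom hpre
  unfold Spec_get_residue_from_columns
  simp only [get_residue_from_columns, get_residue_from_columns_alt]
  rw [pvFoldA_eq name columns hpre]
  rw [pvBuildA_items, pvBuildB_items (fun k =>
    PySem.List.sorted (((columns.filter (fun c => PySem.Str.isIn name c)).map pvSplitPairB).filter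
      (fun q => q.2 == k) |>.map Prod.fst) (fun x => x) false)]
  rw [List.map_map]
  apply List.map_congr_left
  intro k _
  simp [pvCollect]
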